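-- pv_equiv track=rewrite | github.com/truongtd021-dev/8_Quan_Hau_AI | BanCo8Hau.py | uoc_luong_h
-- ===== SOURCE A (Python) =====
-- def uoc_luong_h(trangThai, row_next, col_next):
--     s = trangThai + ((row_next, col_next),)
--     h=0
--     for i in range(row_next+1, 8):
--         for j in range(8):
--             for r0, c0 in s:
--                 if j==c0 or (i-j==r0-c0) or (i+j==r0+c0):
--                     h += 1
--                     break
--     return h
-- ===== SOURCE B (Python) =====
-- def uoc_luong_h(trangThai, row_next, col_next):
--     queens = list(trangThai) + [(row_next, col_next)]
--     cols = {c for _, c in queens}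
--     diags = {r - c for r, c in queens}
--     antis = {r + c for r, c in queens}
--     h = 0
--     for i in range(row_next + 1, 8):
--         # every column attacked in row i, as one set: occupied columns,
--         # diagonal hits j = i - d, anti-diagonal hits j = a - i
--         attacked = cols | {i - d for d in diags} | {a - i for a in antis}
--         h += sum(1 for j in attacked if 0 <= j < 8)
--     return h
-- ===== Notes on version B (the rewrite author's own statement) =====
-- stated objective: alternative
-- what changed: B drops both the per-cell column loop and the per-cell queen scan: for each future row it constructs the set of attacked columns directly (occupied columns unioned with the diagonal images i-d and anti-diagonal images a-i) and adds the count of its members inside the board, so no cell-by-cell attack test exists at all.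
import Mathlib
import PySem

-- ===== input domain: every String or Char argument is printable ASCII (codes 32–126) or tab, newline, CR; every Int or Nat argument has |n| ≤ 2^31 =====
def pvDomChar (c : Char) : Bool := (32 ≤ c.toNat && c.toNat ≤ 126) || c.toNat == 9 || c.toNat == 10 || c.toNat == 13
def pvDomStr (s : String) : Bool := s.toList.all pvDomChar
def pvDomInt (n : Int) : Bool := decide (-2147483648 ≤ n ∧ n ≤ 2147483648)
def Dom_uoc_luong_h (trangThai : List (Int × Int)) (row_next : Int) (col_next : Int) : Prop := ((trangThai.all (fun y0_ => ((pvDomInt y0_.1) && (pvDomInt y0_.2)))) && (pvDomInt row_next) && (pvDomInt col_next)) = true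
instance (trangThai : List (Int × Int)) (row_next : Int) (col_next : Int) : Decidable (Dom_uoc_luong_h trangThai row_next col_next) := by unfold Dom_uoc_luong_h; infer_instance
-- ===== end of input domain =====

-- B removes the cell-by-cell attack test entirely: per future row it builds the set of
-- attacked columns (occupied columns ∪ diagonal images ∪ anti-diagonal images) and counts
-- its in-board members; an alternative decomposition, not claimed faster.
-- ===== PORT A =====
def uoc_luong_h (trangThai : List (Int × Int)) (row_next : Int) (col_next : Int) : Int :=
  let s := trangThai ++ [(row_next, col_next)]
  (PySem.List.pyRange (row_next + 1) 8 1).foldl (fun h i =>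
    (PySem.List.pyRange 0 8 1).foldl (fun h j =>
      -- 'for r0, c0 in s: if …: h += 1; break' — first hit increments once, i.e. any
      if s.any (fun p => j == p.2 || i - j == p.1 - p.2 || i + j == p.1 + p.2)
      then h + 1 else h) h) 0

-- ===== PORT B =====
def uoc_luong_h_alt (trangThai : List (Int × Int)) (row_next : Int) (col_next : Int) : Int :=
  let queens := trangThai ++ [(row_next, col_next)]
  let cols : PySem.Set Int := PySem.Set.ofList (queens.map (fun p => p.2))
  let diags : PySem.Set Int := PySem.Set.ofList (queens.map (fun p => p.1 - p.2))
  let antis : PySem.Set Int := PySem.Set.ofList (queens.map (fun p => p.1 + p.2))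
  (PySem.List.pyRange (row_next + 1) 8 1).foldl (fun h i =>
    let attacked : PySem.Set Int :=
      PySem.Set.union
        (PySem.Set.union cols (PySem.Set.ofList (diags.map (fun d => i - d))))
        (PySem.Set.ofList (antis.map (fun a => a - i)))
    -- sum(1 for j in attacked if 0 <= j < 8): order-independent consumption of the set
    h + ((attacked.filter (fun j => decide (0 ≤ j) && decide (j < 8))).length : Int)) 0

-- ===== PRECONDITION & SPEC =====
def Spec_uoc_luong_h (trangThai : List (Int × Int)) (row_next : Int) (col_next : Int) (out : Int) : Prop := out = uoc_luong_h_alt trangThai row_next col_next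
instance (trangThai : List (Int × Int)) (row_next : Int) (col_next : Int) (out : Int) : Decidable (Spec_uoc_luong_h trangThai row_next col_next out) := by unfold Spec_uoc_luong_h; infer_instance

-- ===== CLAIM =====
def Claim_equal_uoc_luong_h : Prop := ∀ (trangThai : List (Int × Int)) (row_next : Int) (col_next : Int), Dom_uoc_luong_h trangThai row_next col_next → Spec_uoc_luong_h trangThai row_next col_next (uoc_luong_h trangThai row_next col_next)

-- ===== LEMMAS AND PROOFS =====
-- A's inner loop is a filtered count over the columns
theorem pvFoldl_count (l : List Int) (p : Int → Bool) (h : Int) :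
    l.foldl (fun h j => if p j then h + 1 else h) h = h + ((l.filter p).length : Int) := by
  induction l generalizing h with
  | nil => simp
  | cons x xs ih =>
    simp only [List.foldl_cons, List.filter_cons]
    split_ifs with hx <;> rw [ih] <;> simp only [List.length_cons] <;> push_cast <;> ring

-- membership in B's attacked set = A's per-cell condition
theorem pvMem_attacked (s : List (Int × Int)) (i j : Int) :
    (j ∈ PySem.Set.union
        (PySem.Set.union (PySem.Set.ofList (s.map (fun p => p.2)))
          (PySem.Set.ofList ((PySem.Set.ofList (s.map (fun p => p.1 - p.2))).map (fun d => i - d))))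
        (PySem.Set.ofList ((PySem.Set.ofList (s.map (fun p => p.1 + p.2))).map (fun a => a - i))))
    ↔ s.any (fun p => j == p.2 || i - j == p.1 - p.2 || i + j == p.1 + p.2) = true := by
  simp only [PySem.Set.mem_union, PySem.Set.mem_ofList, List.mem_map, List.any_eq_true,
    Bool.or_eq_true, beq_iff_eq]
  constructor
  · rintro ((⟨p, hp, h⟩ | ⟨d, ⟨p, hp, hd⟩, h⟩) | ⟨a, ⟨p, hp, ha⟩, h⟩) <;>
      exact ⟨p, hp, by omega⟩
  · rintro ⟨p, hp, ((h1 | h2) | h3)⟩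
    · exact Or.inl (Or.inl ⟨p, hp, by omega⟩)
    · exact Or.inl (Or.inr ⟨p.1 - p.2, ⟨p, hp, rfl⟩, by omega⟩)
    · exact Or.inr ⟨p.1 + p.2, ⟨p, hp, rfl⟩, by omega⟩

-- two nodup lists with equal membership have equal length
theorem pvLen_eq_of_nodup {l₁ l₂ : List Int} (h₁ : l₁.Nodup) (h₂ : l₂.Nodup)
    (hm : ∀ x, x ∈ l₁ ↔ x ∈ l₂) : l₁.length = l₂.length :=
  ((List.perm_ext_iff_of_nodup h₁ h₂).mpr hm).length_eq

-- the per-row counts agree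
theorem pvRow_eq (s : List (Int × Int)) (i : Int) :
    (((PySem.List.pyRange 0 8 1).filter
        (fun j => s.any (fun p => j == p.2 || i - j == p.1 - p.2 || i + j == p.1 + p.2))).length : Int)
    = (((PySem.Set.union
        (PySem.Set.union (PySem.Set.ofList (s.map (fun p => p.2)))
          (PySem.Set.ofList ((PySem.Set.ofList (s.map (fun p => p.1 - p.2))).map (fun d => i - d))))
        (PySem.Set.ofList ((PySem.Set.ofList (s.map (fun p => p.1 + p.2))).map (fun a => a - i)))).filter
        (fun j => decide (0 ≤ j) && decide (j < 8))).length : Int) := by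
  have hrange : PySem.List.pyRange 0 8 1 = [0, 1, 2, 3, 4, 5, 6, 7] := by decide
  congr 1
  apply pvLen_eq_of_nodup
  · exact List.Nodup.filter _ (by rw [hrange]; decide)
  · exact List.Nodup.filter _
      (PySem.Set.nodup_union _ _ (PySem.Set.nodup_union _ _ (PySem.Set.nodup_ofList _)))
  · intro x
    simp only [List.mem_filter, Bool.and_eq_true, decide_eq_true_eq, hrange]
    rw [← pvMem_attacked s i x]
    constructor
    · rintro ⟨hx, hc⟩
      refine ⟨hc, ?_, ?_⟩ <;> · fin_cases hx <;> omega
    · rintro ⟨hc, h0, h8⟩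
      refine ⟨?_, hc⟩
      interval_cases x <;> simp
  
-- ===== VERDICT =====
theorem uoc_luong_h_spec : Claim_equal_uoc_luong_h := by
  intro t r c _
  unfold Spec_uoc_luong_h uoc_luong_h uoc_luong_h_alt
  simp only []
  apply List.foldl_ext
  intro h i _
  rw [pvFoldl_count, pvRow_eq]
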